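-- pv_equiv track=rewrite | github.com/kevinveenbirkenbach/infinito-nexus | tests/lint/repository/test_no_inline_multiline_php_in_sh.py | _find_php_r_close
-- ===== SOURCE A (Python) =====
-- from typing import Iterable, List, Optional
--
-- def _find_php_r_close(
--     lines: List[str], start_idx: int, quote: str, after_col: int
-- ) -> Optional[int]:
--     """Return the index of the line that closes a ``php -r <quote>``
--     block opened on ``lines[start_idx]`` at ``after_col``. The closing
--     rule is the first occurrence of *quote* that is not preceded by an
--     odd number of backslashes. Returns None if unterminated.
--     """
--     first = lines[start_idx][after_col:]
--     if _has_unescaped(first, quote):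
--         return start_idx
--     for i in range(start_idx + 1, len(lines)):
--         if _has_unescaped(lines[i], quote):
--             return i
--     return None
--
-- def _has_unescaped(segment: str, quote: str) -> bool:
--     """Return True if *segment* contains *quote* not preceded by an odd
--     number of backslashes. Bash single-quoted strings cannot be escaped
--     at all (a literal ``'`` must close the string), but we treat the
--     rule uniformly — a stray escaped quote inside a double-quoted body
--     is still unlikely to terminate.
--     """
--     i = 0
--     while i < len(segment):
--         c = segment[i]
--         if c == quote:
--             backslashes = 0
--             j = i - 1
--             while j >= 0 and segment[j] == "\\":
--                 backslashes += 1
--                 j -= 1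
--             if backslashes % 2 == 0:
--                 return True
--         i += 1
--     return False
-- ===== SOURCE B (Python) =====
-- def _find_php_r_close(lines, start_idx, quote, after_col):
--     # One fused loop over all candidate lines; each line is checked by a single
--     # forward pass that keeps the length of the backslash run preceding the
--     # current character (its parity decides whether a quote is escaped).
--     for i in range(start_idx, len(lines)):
--         seg = lines[i][after_col:] if i == start_idx else lines[i]
--         bs = 0
--         for c in seg:
--             if c == quote and bs % 2 == 0:
--                 return i
--             bs = bs + 1 if c == "\\" else 0
--     return None
-- ===== Notes on version B (the rewrite author's own statement) =====
-- stated objective: alternative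
-- what changed: Replaced A's two-stage structure (special-cased first line plus a separate loop, each calling a helper that rescans the preceding backslashes backwards for every quote found) by one fused loop whose inner scan is a single forward pass tracking the current backslash-run length and deciding each quote by its parity.
import Mathlib
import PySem

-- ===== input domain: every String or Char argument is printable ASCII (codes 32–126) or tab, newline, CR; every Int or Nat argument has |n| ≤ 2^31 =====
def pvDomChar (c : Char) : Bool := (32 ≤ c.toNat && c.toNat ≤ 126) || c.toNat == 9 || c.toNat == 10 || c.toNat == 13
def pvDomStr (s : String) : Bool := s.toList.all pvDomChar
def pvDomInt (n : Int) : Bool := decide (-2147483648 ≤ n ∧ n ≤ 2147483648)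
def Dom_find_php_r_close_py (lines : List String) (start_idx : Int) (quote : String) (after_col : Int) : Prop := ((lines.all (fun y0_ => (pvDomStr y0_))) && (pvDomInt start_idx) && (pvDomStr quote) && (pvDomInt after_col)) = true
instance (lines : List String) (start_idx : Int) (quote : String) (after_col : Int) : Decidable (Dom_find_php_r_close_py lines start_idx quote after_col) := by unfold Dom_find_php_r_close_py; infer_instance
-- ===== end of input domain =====

-- B fuses A's special-cased first line and follow-up loop into one loop over
-- range(start_idx, len(lines)) and replaces the per-quote backward backslash
-- rescan by a single forward pass tracking the backslash-run length (alternative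
-- decomposition; not measured markedly faster on the generated inputs).

-- ===== PORT A =====
-- inner 'while j >= 0 and segment[j] == "\\"' loop of _has_unescaped:
-- pvBackCountA seg i = number of consecutive backslashes immediately before index i
def pvBackCountA (seg : List Char) : Nat → Nat
  | 0 => 0
  | j + 1 => if seg.getD j ' ' = '\\' then pvBackCountA seg j + 1 else 0

-- outer 'while i < len(segment)' loop of _has_unescaped (i is the index, rest = seg.drop i);
-- 'segment[i] == quote' with quote a Python str is 'quote.toList = [c]'
def pvScanA (seg : List Char) (quote : String) : Nat → List Char → Bool
  | _, [] => false
  | i, c :: t =>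
    if quote.toList = [c] ∧ pvBackCountA seg i % 2 = 0 then true
    else pvScanA seg quote (i + 1) t

def pvHasUnescapedA (seg : List Char) (quote : String) : Bool :=
  pvScanA seg quote 0 seg

def find_php_r_close_py (lines : List String) (start_idx : Int) (quote : String) (after_col : Int) : Option Int :=
  match PySem.List.pyGet? lines start_idx with
  | none => none   -- lines[start_idx] raises IndexError: excluded by Pre_
  | some line =>
    let first := PySem.List.slice line.toList (some after_col) none
    if pvHasUnescapedA first quote then some start_idx
    else (PySem.List.pyRange (start_idx + 1) lines.length 1).find?
           (fun i => pvHasUnescapedA ((PySem.List.pyGet? lines i).getD "").toList quote)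
      -- under Pre_ every i in this range is a valid Python index, so the getD default is never used

-- ===== PORT B =====
-- inner 'for c in seg' of Source B, with bs = current backslash-run length
def pvScanB (quote : String) (bs : Nat) : List Char → Bool
  | [] => false
  | c :: t =>
    if quote.toList = [c] ∧ bs % 2 = 0 then true
    else pvScanB quote (if c = '\\' then bs + 1 else 0) t

def find_php_r_close_py_alt (lines : List String) (start_idx : Int) (quote : String) (after_col : Int) : Option Int :=
  (PySem.List.pyRange start_idx lines.length 1).find? (fun i =>
    pvScanB quote 0
      (if i = start_idx
       then PySem.List.slice ((PySem.List.pyGet? lines i).getD "").toList (some after_col) none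
       else ((PySem.List.pyGet? lines i).getD "").toList))
  -- under Pre_ every i drawn from the range is a valid Python index, so getD's default is never used

-- ===== PRECONDITION & SPEC =====
-- Pre_ excludes exactly the inputs where lines[start_idx] raises IndexError in A.
def Pre_find_php_r_close_py (lines : List String) (start_idx : Int) (quote : String) (after_col : Int) : Prop :=
  PySem.Raise.InRange lines.length start_idx
instance (lines : List String) (start_idx : Int) (quote : String) (after_col : Int) : Decidable (Pre_find_php_r_close_py lines start_idx quote after_col) := by unfold Pre_find_php_r_close_py; infer_instance

def pvWitness_find_php_r_close_py : List String × Int × String × Int :=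
  (["php -r 'echo 1;", "still open \\'", "done'"], 0, "'", 7)

def Spec_find_php_r_close_py (lines : List String) (start_idx : Int) (quote : String) (after_col : Int) (out : Option Int) : Prop := out = find_php_r_close_py_alt lines start_idx quote after_col
instance (lines : List String) (start_idx : Int) (quote : String) (after_col : Int) (out : Option Int) : Decidable (Spec_find_php_r_close_py lines start_idx quote after_col out) := by unfold Spec_find_php_r_close_py; infer_instance

-- ===== CLAIM (what is proved, stated in full; the proofs are below) =====
def Claim_equal_find_php_r_close_py : Prop := ∀ (lines : List String) (start_idx : Int) (quote : String) (after_col : Int), Dom_find_php_r_close_py lines start_idx quote after_col → Pre_find_php_r_close_py lines start_idx quote after_col → Spec_find_php_r_close_py lines start_idx quote after_col (find_php_r_close_py lines start_idx quote after_col)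

-- ===== LEMMAS AND PROOFS =====

-- B's running backslash counter equals A's backward count at every index
theorem pvScan_eq (seg : List Char) (quote : String) :
    ∀ (rest : List Char) (i : Nat), seg.drop i = rest →
      pvScanA seg quote i rest = pvScanB quote (pvBackCountA seg i) rest := by
  intro rest
  induction rest with
  | nil => intro i _; rfl
  | cons c t ih =>
    intro i hdrop
    have hget : seg[i]? = some c := by
      have h0 : (seg.drop i)[0]? = some c := by rw [hdrop]; rfl
      simpa [List.getElem?_drop] using h0
    have hnext : seg.drop (i + 1) = t := by
      have : seg.drop (i + 1) = (seg.drop i).drop 1 := by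
        rw [List.drop_drop]
      rw [this, hdrop]; rfl
    simp only [pvScanA, pvScanB]
    split
    · rfl
    · rw [ih (i + 1) hnext]
      congr 1
      simp [pvBackCountA, List.getD_eq_getElem?_getD, hget]

theorem pvHas_eq (seg : List Char) (quote : String) :
    pvHasUnescapedA seg quote = pvScanB quote 0 seg := by
  have := pvScan_eq seg quote seg 0 rfl
  simpa [pvHasUnescapedA, pvBackCountA] using this

theorem pvFind?_congr {α : Type} (l : List α) (p q : α → Bool)
    (h : ∀ a ∈ l, p a = q a) : l.find? p = l.find? q := by
  induction l with
  | nil => rfl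
  | cons a t ih =>
    simp only [List.find?]
    rw [h a (List.mem_cons_self), ih (fun b hb => h b (List.mem_cons_of_mem a hb))]

-- ===== VERDICT (by name: the statement is the Claim_ definition above) =====
theorem find_php_r_close_py_spec : Claim_equal_find_php_r_close_py := by
  intro lines start_idx quote after_col _ hpre
  unfold Spec_find_php_r_close_py find_php_r_close_py find_php_r_close_py_alt
  have hlt : start_idx < (lines.length : Int) := hpre.2
  rw [PySem.List.pyRange_one_cons hlt]
  cases hg : PySem.List.pyGet? lines start_idx with
  | none =>
    exact absurd hpre ((PySem.List.pyGet?_eq_none_iff lines start_idx).mp hg)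
  | some line =>
    simp only [List.find?, hg, Option.getD, if_true, pvHas_eq]
    cases hb : pvScanB quote 0 (PySem.List.slice line.toList (some after_col) none) with
    | true => simp
    | false =>
      simp only [Bool.false_eq_true, if_false]
      apply pvFind?_congr
      intro i hi
      have hmem := (PySem.List.mem_pyRange_one.mp hi).1
      have hne : ¬ (i = start_idx) := by omega
      rw [if_neg hne]
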